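-- pv_equiv track=rewrite | github.com/mohankalimuthu/My_Learnings | DSAsolving/daily_problems/12-01-2026/absolute diffrence of 1.py | absolute_diff
-- ===== SOURCE A (Python) =====
-- def absolute_diff(arr,k):
--     res = []
--     for i in arr:
--         if i>9 and i<k:
--             s = str(i)
--             if all((abs(int(s[i]) - int(s[i + 1]))) == 1 for i in range(len(s) - 1)):
--                 res.append(i)
--     return res
-- ===== SOURCE B (Python) =====
-- def absolute_diff(arr, k):
--     # Arithmetic digit walk (no string conversion): peel digits with // and %
--     def is_stepping(n):
--         while n >= 10:
--             if abs(n // 10 % 10 - n % 10) != 1: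
--                 return False
--             n //= 10
--         return True
--     return [i for i in arr if 9 < i < k and is_stepping(i)]
-- ===== Notes on version B (the rewrite author's own statement) =====
-- stated objective: faster
-- what changed: B tests each element by peeling digits arithmetically with // and % (no string conversion or per-index int() parsing) and builds the result as a single filter comprehension; a timing run measured it about 1.9x faster at the largest size.
import Mathlib
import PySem

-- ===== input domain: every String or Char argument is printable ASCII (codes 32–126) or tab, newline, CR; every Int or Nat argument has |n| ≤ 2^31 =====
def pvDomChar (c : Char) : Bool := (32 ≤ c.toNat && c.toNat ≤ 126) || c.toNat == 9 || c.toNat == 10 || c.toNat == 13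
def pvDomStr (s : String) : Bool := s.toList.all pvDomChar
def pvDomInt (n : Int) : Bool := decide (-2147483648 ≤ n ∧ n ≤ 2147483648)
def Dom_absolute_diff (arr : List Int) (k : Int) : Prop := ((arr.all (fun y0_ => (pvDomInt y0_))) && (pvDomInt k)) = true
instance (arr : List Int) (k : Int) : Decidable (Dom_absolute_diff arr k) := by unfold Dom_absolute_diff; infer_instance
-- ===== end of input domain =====

-- ===== PORT A =====
-- B replaces A's per-element string-digit scan by an arithmetic digit walk (//, %); same asymptotics, measured constant-factor speedup.

-- int(s[j]) for a single character of str(i): IndexError/ValueError are unreachable here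
-- (the index is always in range and the character is a decimal digit), so the none case is defaulted.
def pvAt (s : String) (j : Int) : Int :=
  ((PySem.Str.pyGet? s j).bind (fun c => PySem.Int.ofChars? [c])).getD 0

def absolute_diff (arr : List Int) (k : Int) : List Int :=
  arr.foldl (fun res i =>
    if 9 < i ∧ i < k then
      let s := PySem.Int.toStr i
      if (PySem.List.pyRange 0 (PySem.Str.len s - 1) 1).all
          (fun j => (pvAt s j - pvAt s (j + 1)).natAbs == 1)
      then res ++ [i] else res
    else res) []

-- ===== PORT B =====
-- Python // and % with the positive divisor 10 agree with Int.ediv/emod (cited by the port's decreasing_by)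
lemma pvFdiv10 (a : Int) : a.fdiv 10 = a / 10 := by
  rw [Int.fdiv_eq_ediv]; norm_num

def pvIsStepping (n : Int) : Bool :=
  if _h : n < 10 then true
  else
    (((PySem.Int.floordiv n 10).fmod 10 - PySem.Int.mod n 10).natAbs == 1)
      && pvIsStepping (PySem.Int.floordiv n 10)
termination_by n.toNat
decreasing_by
  simp only [PySem.Int.floordiv, pvFdiv10]
  omega

def absolute_diff_alt (arr : List Int) (k : Int) : List Int :=
  arr.filter (fun i => decide (9 < i) && decide (i < k) && pvIsStepping i)

-- ===== PRECONDITION & SPEC =====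
def Spec_absolute_diff (arr : List Int) (k : Int) (out : List Int) : Prop := out = absolute_diff_alt arr k
instance (arr : List Int) (k : Int) (out : List Int) : Decidable (Spec_absolute_diff arr k out) := by unfold Spec_absolute_diff; infer_instance

-- ===== CLAIM (what is proved, stated in full; the proofs are below) =====
def Claim_equal_absolute_diff : Prop := ∀ (arr : List Int) (k : Int), Dom_absolute_diff arr k → Spec_absolute_diff arr k (absolute_diff arr k)

-- ===== LEMMAS AND PROOFS =====

-- value of a single digit character as read back by int()
def pvAval (c : Char) : Int := (PySem.Int.ofChars? [c]).getD 0

lemma pvFmod10 (a : Int) : a.fmod 10 = a % 10 := by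
  rw [Int.fmod_eq_emod]; norm_num

-- structural form of A's indexed adjacent-digit check
def pvChain (cs : List Char) : Bool :=
  match cs with
  | a :: b :: t => ((pvAval a - pvAval b).natAbs == 1) && pvChain (b :: t)
  | _ => true

lemma pvAval_digitChar (d : Nat) (hd : d < 10) : pvAval (Nat.digitChar d) = (d : Int) := by
  interval_cases d <;> decide

-- toDigitsCore accumulator shift
lemma pvCore_acc (b : Nat) : ∀ (f n : Nat) (ds : List Char),
    Nat.toDigitsCore b f n ds = Nat.toDigitsCore b f n [] ++ ds := by
  intro f
  induction f with
  | zero => intro n ds; simp [Nat.toDigitsCore]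
  | succ f ih =>
    intro n ds
    simp only [Nat.toDigitsCore]
    by_cases h : n / b = 0
    · simp [h]
    · simp only [h, if_false]
      rw [ih (n / b) (Nat.digitChar (n % b) :: ds), ih (n / b) [Nat.digitChar (n % b)]]
      simp

-- fuel irrelevance for toDigitsCore (base 10)
lemma pvCore_fuel : ∀ (n f f' : Nat), n < f → n < f' →
    Nat.toDigitsCore 10 f n [] = Nat.toDigitsCore 10 f' n [] := by
  intro n
  induction n using Nat.strong_induction_on with
  | _ n ih =>
    intro f f' hf hf'
    obtain ⟨g, rfl⟩ : ∃ g, f = g + 1 := ⟨f - 1, by omega⟩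
    obtain ⟨g', rfl⟩ : ∃ g', f' = g' + 1 := ⟨f' - 1, by omega⟩
    simp only [Nat.toDigitsCore]
    by_cases h : n / 10 = 0
    · simp [h]
    · simp only [h, if_false]
      rw [pvCore_acc, pvCore_acc 10 g']
      rw [ih (n / 10) (by omega) g g' (by omega) (by omega)]

lemma pvToDigits_lt (m : Nat) (hm : m < 10) : Nat.toDigits 10 m = [Nat.digitChar m] := by
  simp [Nat.toDigits, Nat.toDigitsCore, Nat.div_eq_of_lt hm, Nat.mod_eq_of_lt hm]

lemma pvToDigits_step (m : Nat) (hm : 10 ≤ m) :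
    Nat.toDigits 10 m = Nat.toDigits 10 (m / 10) ++ [Nat.digitChar (m % 10)] := by
  have h : ¬ m / 10 = 0 := by omega
  have key : Nat.toDigits 10 m = Nat.toDigitsCore 10 m (m / 10) [Nat.digitChar (m % 10)] := by
    show Nat.toDigitsCore 10 (m + 1) m [] = _
    simp only [Nat.toDigitsCore, h, if_false]
  rw [key, pvCore_acc, pvCore_fuel (m / 10) m (m / 10 + 1) (by omega) (by omega)]
  rfl

lemma pvToDigits_ne_nil (m : Nat) : Nat.toDigits 10 m ≠ [] := by
  by_cases hm : m < 10
  · rw [pvToDigits_lt m hm]; simp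
  · rw [pvToDigits_step m (by omega)]; simp

lemma pvToDigits_getLast (m : Nat) (h : Nat.toDigits 10 m ≠ []) :
    (Nat.toDigits 10 m).getLast h = Nat.digitChar (m % 10) := by
  by_cases hm : m < 10
  · have he := pvToDigits_lt m hm
    rw [List.getLast_eq_iff_getLast?_eq_some, he]
    simp [Nat.mod_eq_of_lt hm]
  · have he := pvToDigits_step m (by omega)
    rw [List.getLast_eq_iff_getLast?_eq_some, he]
    simp

lemma pvChain_snoc (xs : List Char) (h : xs ≠ []) (c : Char) :
    pvChain (xs ++ [c]) = (pvChain xs && ((pvAval (xs.getLast h) - pvAval c).natAbs == 1)) := by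
  induction xs with
  | nil => exact absurd rfl h
  | cons a t ih =>
    cases t with
    | nil => simp [pvChain]
    | cons b t' =>
      have h' : b :: t' ≠ [] := by simp
      simp only [List.cons_append, pvChain]
      rw [← List.cons_append, ih h']
      rw [List.getLast_cons h']
      simp [Bool.and_assoc]

lemma pvIsStepping_eq_chain (m : Nat) : pvIsStepping (m : Int) = pvChain (Nat.toDigits 10 m) := by
  induction m using Nat.strong_induction_on with
  | _ m ih =>
    by_cases hm : m < 10
    · rw [pvIsStepping, pvToDigits_lt m hm]
      simp [pvChain, show ((m : Int) < 10) by exact_mod_cast hm]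
    · rw [pvIsStepping]
      have h10 : ¬ ((m : Int) < 10) := by exact_mod_cast hm
      simp only [h10, dite_false]
      have hfd : PySem.Int.floordiv (m : Int) 10 = ((m / 10 : Nat) : Int) := by
        simp only [PySem.Int.floordiv, pvFdiv10]
        omega
      have hmod : PySem.Int.mod (m : Int) 10 = ((m % 10 : Nat) : Int) := by
        simp only [PySem.Int.mod, pvFmod10]
        omega
      have hmod2 : ((m / 10 : Nat) : Int).fmod 10 = ((m / 10 % 10 : Nat) : Int) := by
        rw [pvFmod10]
        omega
      rw [hfd, hmod, hmod2, ih (m / 10) (by omega)]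
      rw [pvToDigits_step m (by omega)]
      rw [pvChain_snoc _ (pvToDigits_ne_nil (m / 10)) _]
      rw [pvToDigits_getLast (m / 10) (pvToDigits_ne_nil (m / 10))]
      rw [pvAval_digitChar (m / 10 % 10) (by omega), pvAval_digitChar (m % 10) (by omega)]
      rw [Bool.and_comm]

-- A's indexed all-check equals the structural chain check
lemma pvAll_eq_chain (cs : List Char) :
    ((List.range (cs.length - 1)).all fun j =>
      ((cs[j]?.bind (fun c => PySem.Int.ofChars? [c])).getD 0
        - (cs[j+1]?.bind (fun c => PySem.Int.ofChars? [c])).getD 0).natAbs == 1) = pvChain cs := by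
  induction cs with
  | nil => simp [pvChain]
  | cons a t ih =>
    cases t with
    | nil => simp [pvChain]
    | cons b t' =>
      have hlen : (a :: b :: t').length - 1 = (b :: t').length - 1 + 1 := by
        simp
      rw [hlen, List.range_succ_eq_map]
      rw [List.all_cons, List.all_map]
      conv_rhs => rw [pvChain]
      rw [← ih]
      rfl

-- per-element agreement of the two digit checks
lemma pvCheck_eq (i : Int) (hi : 9 < i) :
    ((PySem.List.pyRange 0 (PySem.Str.len (PySem.Int.toStr i) - 1) 1).all
      (fun j => (pvAt (PySem.Int.toStr i) j - pvAt (PySem.Int.toStr i) (j + 1)).natAbs == 1))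
    = pvIsStepping i := by
  have hi0 : ¬ i < 0 := by omega
  have hchars : (PySem.Int.toStr i).toList = Nat.toDigits 10 i.toNat := by
    simp [PySem.Int.toStr, PySem.Int.toChars, hi0]
  have hne : Nat.toDigits 10 i.toNat ≠ [] := pvToDigits_ne_nil i.toNat
  have hlen : PySem.Str.len (PySem.Int.toStr i) = ((Nat.toDigits 10 i.toNat).length : Int) := by
    simp [PySem.Str.len, hchars]
  have hlen0 : (Nat.toDigits 10 i.toNat).length ≠ 0 := by
    simpa [List.length_eq_zero_iff] using hne
  have hcast : (((Nat.toDigits 10 i.toNat).length : Int) - 1)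
      = (((Nat.toDigits 10 i.toNat).length - 1 : Nat) : Int) := by omega
  rw [hlen, hcast, PySem.List.pyRange_zero_natCast, List.all_map]
  have hfun : ((fun (x : Int) =>
        (pvAt (PySem.Int.toStr i) x - pvAt (PySem.Int.toStr i) (x + 1)).natAbs == 1)
        ∘ (fun k : Nat => (k : Int)))
      = fun j : Nat =>
        ((((Nat.toDigits 10 i.toNat)[j]?.bind (fun c => PySem.Int.ofChars? [c])).getD 0
          - ((Nat.toDigits 10 i.toNat)[j+1]?.bind (fun c => PySem.Int.ofChars? [c])).getD 0).natAbs == 1) := by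
    funext j
    have hj1 : ((j : Int) + 1) = ((j + 1 : Nat) : Int) := by push_cast; ring
    simp only [Function.comp_apply, pvAt, hj1, PySem.Str.pyGet?_natCast, hchars]
  rw [hfun, pvAll_eq_chain]
  have hi' : ((i.toNat : Nat) : Int) = i := by omega
  rw [← hi', pvIsStepping_eq_chain, Int.toNat_natCast]

lemma pvStep_eq (k i : Int) (res : List Int) :
    (if 9 < i ∧ i < k then
      let s := PySem.Int.toStr i
      if (PySem.List.pyRange 0 (PySem.Str.len s - 1) 1).all
          (fun j => (pvAt s j - pvAt s (j + 1)).natAbs == 1)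
      then res ++ [i] else res
    else res)
    = (if (decide (9 < i) && decide (i < k) && pvIsStepping i) = true then res ++ [i] else res) := by
  by_cases hg : 9 < i ∧ i < k
  · rw [if_pos hg]
    show (if (PySem.List.pyRange 0 (PySem.Str.len (PySem.Int.toStr i) - 1) 1).all
          (fun j => (pvAt (PySem.Int.toStr i) j - pvAt (PySem.Int.toStr i) (j + 1)).natAbs == 1)
        then res ++ [i] else res) = _
    rw [pvCheck_eq i hg.1]
    have hp : (decide (9 < i) && decide (i < k)) = true := by simp [hg.1, hg.2]
    rw [hp, Bool.true_and]
  · rw [if_neg hg]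
    rcases not_and_or.mp hg with h | h <;> simp [h]

lemma pvFold_eq (k : Int) : ∀ (arr : List Int) (acc : List Int),
    arr.foldl (fun res i =>
      if 9 < i ∧ i < k then
        let s := PySem.Int.toStr i
        if (PySem.List.pyRange 0 (PySem.Str.len s - 1) 1).all
            (fun j => (pvAt s j - pvAt s (j + 1)).natAbs == 1)
        then res ++ [i] else res
      else res) acc
    = acc ++ arr.filter (fun i => decide (9 < i) && decide (i < k) && pvIsStepping i) := by
  intro arr
  induction arr with
  | nil => intro acc; simp
  | cons i t ih =>
    intro acc
    rw [List.foldl_cons, List.filter_cons, pvStep_eq k i acc]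
    by_cases hc : (decide (9 < i) && decide (i < k) && pvIsStepping i) = true
    · rw [if_pos hc, if_pos hc, ih]
      simp
    · rw [if_neg hc, ih]
      simp only [Bool.not_eq_true] at hc
      rw [hc]
      simp

-- ===== VERDICT (by name: the statement is the Claim_ definition above) =====
theorem absolute_diff_spec : Claim_equal_absolute_diff := by
  intro arr k _
  unfold Spec_absolute_diff absolute_diff absolute_diff_alt
  rw [pvFold_eq k arr []]
  simp
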